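-- pv_equiv track=rewrite | github.com/Tibboh17/BOJ | 프로그래머스/0/181887. 홀수 vs 짝수/홀수 vs 짝수.py | solution
-- ===== SOURCE A (Python) =====
-- def solution(num_list):
--     even_sum = 0
--     odd_sum = 0
--
--     for i in range(1, len(num_list) + 1):
--         if i % 2 == 0:
--             even_sum += num_list[i - 1]
--         else:
--             odd_sum += num_list[i - 1]
--
--     answer = max(even_sum, odd_sum)
--
--     return answer
-- ===== SOURCE B (Python) =====
-- def solution(num_list):
--     odd_sum = sum(num_list[0::2])
--     even_sum = sum(num_list[1::2])
--     return max(even_sum, odd_sum)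
-- ===== Notes on version B (the rewrite author's own statement) =====
-- stated objective: simpler
-- what changed: Replaces the indexed loop with its i%2 branch by two strided slices (num_list[0::2], num_list[1::2]) summed independently with builtin sum, then max of the two sums.
import Mathlib
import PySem

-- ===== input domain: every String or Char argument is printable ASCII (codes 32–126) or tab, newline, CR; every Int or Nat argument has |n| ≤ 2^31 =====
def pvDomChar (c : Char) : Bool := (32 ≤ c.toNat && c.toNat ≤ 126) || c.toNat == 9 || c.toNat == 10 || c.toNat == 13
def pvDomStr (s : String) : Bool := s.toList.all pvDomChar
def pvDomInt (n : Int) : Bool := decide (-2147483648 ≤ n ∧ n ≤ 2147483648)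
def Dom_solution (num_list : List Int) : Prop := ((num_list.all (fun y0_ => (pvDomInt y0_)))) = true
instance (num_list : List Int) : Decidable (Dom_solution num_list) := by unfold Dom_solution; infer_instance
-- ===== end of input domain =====

-- B replaces A's indexed loop with its i%2 branch by two strided slices summed independently (simpler decomposition, same cost).


-- ===== PORT A =====
def solution (num_list : List Int) : Int :=
  let st :=
    (PySem.List.pyRange 1 ((num_list.length : Int) + 1) 1).foldl
      (fun (p : Int × Int) i =>
        if PySem.Int.mod i 2 == 0 then (p.1 + PySem.List.pyGetD num_list (i - 1) 0, p.2)
        else (p.1, p.2 + PySem.List.pyGetD num_list (i - 1) 0)) (0, 0)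
  max st.1 st.2

-- ===== PORT B =====
def solution_alt (num_list : List Int) : Int :=
  let odd_sum := ((PySem.List.slice? num_list (some 0) none 2).getD []).sum
  let even_sum := ((PySem.List.slice? num_list (some 1) none 2).getD []).sum
  max even_sum odd_sum

-- ===== PRECONDITION & SPEC =====
def Spec_solution (num_list : List Int) (out : Int) : Prop := out = solution_alt num_list
instance (num_list : List Int) (out : Int) : Decidable (Spec_solution num_list out) := by unfold Spec_solution; infer_instance

-- ===== CLAIM (what is proved, stated in full; the proofs are below) =====
def Claim_equal_solution : Prop := ∀ (num_list : List Int), Dom_solution num_list → Spec_solution num_list (solution num_list)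

-- ===== LEMMAS AND PROOFS =====

-- (elements at even 0-based positions, elements at odd 0-based positions)
def split2 : List Int → List Int × List Int
  | [] => ([], [])
  | x :: t => (x :: (split2 t).2, (split2 t).1)

theorem split2_get (xs : List Int) (k : Nat) :
    (split2 xs).1[k]? = xs[2 * k]? ∧ (split2 xs).2[k]? = xs[2 * k + 1]? := by
  induction xs generalizing k with
  | nil => simp [split2]
  | cons x t ih =>
    constructor
    · cases k with
      | zero => simp [split2]
      | succ k =>
        have h := (ih k).2
        simp only [split2]
        have h2 : 2 * (k + 1) = (2 * k + 1) + 1 := by omega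
        rw [h2]
        simpa using h
    · have h := (ih k).1
      simp only [split2]
      simpa using h

-- closed form of a step-2 slice xs[a::2] (a = 0 or 1)
theorem slice?_two (xs : List Int) (a : Nat) (ha : a ≤ 1) :
    PySem.List.slice? xs (some (a : Int)) none 2 =
      some ((List.range ((xs.length + 1 - a) / 2)).map (fun k => xs.getD (2 * k + a) 0)) := by
  simp only [PySem.List.slice?, PySem.List.sliceIndices]
  norm_num
  rcases Nat.lt_or_ge xs.length a with h | h
  · have hl : xs.length = 0 := by omega
    have ha0 : a = 1 := by omega
    subst ha0
    simp [List.length_eq_zero_iff.mp hl]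
  · have hneg : ¬ ((a : Int) < 0) := by omega
    simp only [hneg, if_false]
    rw [show min (a:Int) (xs.length:Int) = (a:Int) from by omega]
    have hc : (if (a : Int) < (xs.length : Int) then (((xs.length : Int) - a + 2 - 1) / 2).toNat else 0)
        = (xs.length + 1 - a) / 2 := by
      split_ifs with h2 <;> omega
    rw [hc]
    have hcong : List.filterMap (fun x : Nat => xs[((a : Int) + 2 * (x : Int)).toNat]?) (List.range ((xs.length + 1 - a) / 2))
        = List.filterMap (fun k : Nat => some (xs.getD (2 * k + a) 0)) (List.range ((xs.length + 1 - a) / 2)) := by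
      apply List.filterMap_congr
      intro k hk
      rw [List.mem_range] at hk
      have hidx : ((a : Int) + 2 * (k : Int)).toNat = 2 * k + a := by omega
      have hlt : 2 * k + a < xs.length := by omega
      rw [hidx, List.getElem?_eq_getElem hlt, List.getD, List.getElem?_eq_getElem hlt]
      simp
    rw [hcong]; simp [List.getD]

theorem map_range_even (xs : List Int) :
    (List.range ((xs.length + 1) / 2)).map (fun k => xs.getD (2 * k) 0) = (split2 xs).1 := by
  apply List.ext_getElem?
  intro i
  rcases Nat.lt_or_ge i ((xs.length + 1) / 2) with h | h
  · have h2 : 2 * i < xs.length := by omega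
    rw [(split2_get xs i).1]
    simp [h, List.getD, List.getElem?_eq_getElem h2]
  · rw [(split2_get xs i).1]
    simp [Nat.not_lt.mpr h]
    omega

theorem map_range_odd (xs : List Int) :
    (List.range (xs.length / 2)).map (fun k => xs.getD (2 * k + 1) 0) = (split2 xs).2 := by
  apply List.ext_getElem?
  intro i
  rcases Nat.lt_or_ge i (xs.length / 2) with h | h
  · have h2 : 2 * i + 1 < xs.length := by omega
    rw [(split2_get xs i).2]
    simp [h, List.getD, List.getElem?_eq_getElem h2]
  · rw [(split2_get xs i).2]
    simp [Nat.not_lt.mpr h]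
    omega

theorem solution_alt_eq (xs : List Int) :
    solution_alt xs = max (split2 xs).2.sum (split2 xs).1.sum := by
  unfold solution_alt
  rw [show (some 0 : Option Int) = some (((0:Nat) : Int)) from by norm_num,
      show (some 1 : Option Int) = some (((1:Nat) : Int)) from by norm_num,
      slice?_two xs 0 (by omega), slice?_two xs 1 (by omega)]
  simp only [Option.getD_some, Nat.sub_zero]
  rw [show (xs.length + 1 - 1) / 2 = xs.length / 2 from by omega]
  rw [show (fun k => xs.getD (2 * k + 0) 0) = (fun k => xs.getD (2 * k) 0) from by funext k; simp,
      map_range_even, map_range_odd]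

theorem foldA (t : List Int) (c : Int) (p : Int × Int) :
    (List.range t.length).foldl
      (fun (q : Int × Int) (k : Nat) =>
        if (c + (k : Int)) % 2 = 0 then (q.1 + t.getD k 0, q.2) else (q.1, q.2 + t.getD k 0)) p
    = if c % 2 = 0 then (p.1 + (split2 t).1.sum, p.2 + (split2 t).2.sum)
      else (p.1 + (split2 t).2.sum, p.2 + (split2 t).1.sum) := by
  induction t generalizing c p with
  | nil => simp [split2]
  | cons x t ih =>
    rw [List.length_cons, List.range_succ_eq_map, List.foldl_cons, List.foldl_map]
    have hf : (fun (q : Int × Int) (k : Nat) =>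
        if (c + ((k.succ : Nat) : Int)) % 2 = 0 then (q.1 + (x :: t).getD k.succ 0, q.2)
        else (q.1, q.2 + (x :: t).getD k.succ 0))
      = (fun (q : Int × Int) (k : Nat) =>
        if ((c + 1) + (k : Int)) % 2 = 0 then (q.1 + t.getD k 0, q.2)
        else (q.1, q.2 + t.getD k 0)) := by
      funext q k
      have h1 : c + ((k.succ : Nat) : Int) = (c + 1) + (k : Int) := by push_cast; ring
      rw [h1]
      simp [List.getD]
    rw [hf, ih]
    rcases Int.emod_two_eq c with h | h <;>
      simp [split2, h, show ((c+1) % 2 = if c % 2 = 0 then 1 else 0) from by omega] <;> ring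

theorem solution_eq (xs : List Int) :
    solution xs = max (split2 xs).2.sum (split2 xs).1.sum := by
  unfold solution
  rw [PySem.List.pyRange_one]
  rw [show (((xs.length : Int) + 1) - 1).toNat = xs.length from by omega]
  rw [List.foldl_map]
  have hf : (fun (p : Int × Int) (k : Nat) =>
      if PySem.Int.mod (1 + (k : Int)) 2 == 0 then (p.1 + PySem.List.pyGetD xs (1 + (k : Int) - 1) 0, p.2)
      else (p.1, p.2 + PySem.List.pyGetD xs (1 + (k : Int) - 1) 0))
    = (fun (q : Int × Int) (k : Nat) =>
      if ((1 : Int) + (k : Int)) % 2 = 0 then (q.1 + xs.getD k 0, q.2) else (q.1, q.2 + xs.getD k 0)) := by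
    funext q k
    rw [PySem.Int.mod_eq_emod_of_pos (by omega)]
    rw [show (1 + (k : Int) - 1) = (k : Int) from by ring]
    simp
  rw [hf, foldA xs 1 (0, 0)]
  norm_num

-- ===== VERDICT (by name: the statement is the Claim_ definition above) =====
theorem solution_spec : Claim_equal_solution := by
  intro num_list _
  unfold Spec_solution
  rw [solution_eq, solution_alt_eq]
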